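-- pv_equiv track=rewrite | github.com/xur-2002/Agent | scripts/generate_ad.py | _ensure_brand_mentions
-- ===== SOURCE A (Python) =====
-- from typing import Any, Dict, List, Optional
--
-- def _ensure_brand_mentions(text: str, brand: Optional[str], min_count: int = 2) -> str:
--     content = str(text or "").strip()
--     b = str(brand or "").strip()
--     if not b:
--         return content
--     while content.count(b) < min_count:
--         content += f"\n\n{b}"
--     return content
-- ===== SOURCE B (Python) =====
-- from typing import Optional
--
--
-- def _ensure_brand_mentions(text: str, brand: Optional[str], min_count: int = 2) -> str:
--     content = str(text or "").strip()
--     b = str(brand or "").strip()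
--     if not b:
--         return content
--     needed = min_count - content.count(b)
--     if needed > 0:
--         content += ("\n\n" + b) * needed
--     return content
-- ===== Notes on version B (the rewrite author's own statement) =====
-- stated objective: faster
-- what changed: Replaces the while-loop that re-counts the brand after every single append with one count to compute the deficit and a single string-repetition append of all missing copies.
import Mathlib
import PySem

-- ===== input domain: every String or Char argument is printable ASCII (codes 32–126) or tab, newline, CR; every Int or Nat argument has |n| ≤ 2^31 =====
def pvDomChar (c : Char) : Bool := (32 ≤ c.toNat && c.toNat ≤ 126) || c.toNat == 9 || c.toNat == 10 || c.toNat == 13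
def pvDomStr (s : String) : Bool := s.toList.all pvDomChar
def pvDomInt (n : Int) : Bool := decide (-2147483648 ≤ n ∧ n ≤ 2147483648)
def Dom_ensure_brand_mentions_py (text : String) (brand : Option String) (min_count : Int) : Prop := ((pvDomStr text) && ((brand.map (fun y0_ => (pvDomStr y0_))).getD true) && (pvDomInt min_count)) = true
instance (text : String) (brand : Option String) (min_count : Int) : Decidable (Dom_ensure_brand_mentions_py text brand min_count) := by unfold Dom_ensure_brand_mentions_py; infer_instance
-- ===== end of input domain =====

-- B replaces A's while-loop (which re-counts the brand after every single append) by one count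
-- and a single repetition append of all missing copies; return value only, no side effects.

-- ===== PORT A =====
-- 'stripped': nonempty with no whitespace at either end — what `b = str(brand or "").strip()`
-- guarantees after the `if not b` guard. It makes each `content += "\n\n" + b` add exactly one
-- occurrence (pv_count_append_block below), which the loop's decreasing_by cites; hence these
-- lemmas stay above the port.
theorem go_nil (b : List Char) (f acc : Nat) : PySem.Chars.count.go b f [] acc = acc := by
  cases f <;> simp [PySem.Chars.count.go]

theorem go_short (b : List Char) : ∀ (f : Nat) (s : List Char) (acc : Nat),
    s.length < b.length → PySem.Chars.count.go b f s acc = acc := by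
  intro f
  induction f with
  | zero => intro s acc _; simp [PySem.Chars.count.go]
  | succ f ih =>
    intro s acc h
    cases s with
    | nil => exact go_nil b _ acc
    | cons x t =>
      rw [PySem.Chars.count.go.eq_def]
      have hp : b.isPrefixOf (x :: t) = false := by
        by_contra hc
        have : b <+: (x :: t) := by
          rw [← List.isPrefixOf_iff_prefix]; revert hc; cases b.isPrefixOf (x :: t) <;> simp
        have := this.length_le
        simp at this h; omega
      simp [hp]
      exact ih t acc (by simp at h ⊢; omega)

def pvStripped (b : List Char) : Prop :=
  b ≠ [] ∧ (∀ u ∈ b.head?, PySem.Chars.isspace u = false) ∧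
    (∀ u ∈ b.getLast?, PySem.Chars.isspace u = false)

theorem go_key (b : List Char) (hb : pvStripped b) :
    ∀ (n : Nat) (c : List Char) (acc f1 f2 : Nat), c.length = n →
    c.length + 2 + b.length ≤ f1 → c.length ≤ f2 →
    PySem.Chars.count.go b f1 (c ++ '\n' :: '\n' :: b) acc
      = PySem.Chars.count.go b f2 c acc + 1 := by
  obtain ⟨hne, hh, hl⟩ := hb
  have hlenb : 1 ≤ b.length := by cases b <;> simp_all
  intro n
  induction n using Nat.strong_induction_on with
  | _ n ih =>
  intro c acc f1 f2 hcn h1 h2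
  by_cases hp2 : b <+: (c ++ '\n' :: '\n' :: b)
  · -- a match starts here in the extended string
    -- if c = [], the match would start with '\n', impossible: b's head is not whitespace
    cases c with
    | nil =>
      exfalso
      rcases b with _ | ⟨b0, tb⟩
      · exact hne rfl
      · have h0 : b0 = '\n' := by simpa using hp2.getElem (i := 0) (by simp)
        have := hh b0 (by simp)
        rw [h0] at this
        exact absurd this (by decide)
    | cons x t =>
      by_cases hp1 : b <+: x :: t
      · -- the match lies inside c: both scans take it and jump b.length
        have hbc : b.length ≤ (x :: t).length := hp1.length_le
        cases f1 with
        | zero => exfalso; simp only [List.length_cons] at h1; omega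
        | succ f1' =>
        cases f2 with
        | zero => exfalso; simp only [List.length_cons] at h2; omega
        | succ f2' =>
        have hb2 : b.isPrefixOf (x :: (t ++ '\n' :: '\n' :: b)) = true := by
          rw [List.isPrefixOf_iff_prefix]; simpa using hp2
        have hb1 : b.isPrefixOf (x :: t) = true := by
          rw [List.isPrefixOf_iff_prefix]; exact hp1
        rw [PySem.Chars.count.go.eq_def]
        conv_rhs => rw [PySem.Chars.count.go.eq_def]
        simp only [List.cons_append]
        simp [hb2, hb1]
        have hdrop : List.drop b.length (x :: (t ++ '\n' :: '\n' :: b))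
            = List.drop b.length (x :: t) ++ '\n' :: '\n' :: b := by
          rw [show x :: (t ++ '\n' :: '\n' :: b) = (x :: t) ++ '\n' :: '\n' :: b by simp,
            List.drop_append_of_le_length hbc]
        rw [hdrop]
        apply ih ((x :: t).drop b.length).length (by simp at hcn ⊢; omega) _ _ _ _ rfl
        · simp at h1 ⊢; omega
        · simp at h2 ⊢; omega
      · -- a crossing match: forces b.length > c.length + 2, so b occurs in neither remainder
        have hc1 : ¬ b.length ≤ (x :: t).length := by
          intro hle
          have htake := List.prefix_iff_eq_take.mp hp2
          have hbt : b = List.take b.length (x :: t) :=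
            htake.trans (by
              rw [show x :: t ++ '\n' :: '\n' :: b = (x :: t) ++ '\n' :: '\n' :: b by simp,
                List.take_append_of_le_length hle])
          exact hp1 (hbt ▸ List.take_prefix b.length (x :: t))
        have hc2 : ¬ b.length ≤ (x :: t).length + 2 := by
          intro hle
          have hidx : b.length - 1 < ((x :: t) ++ '\n' :: '\n' :: b).length := by
            simp only [List.length_append, List.length_cons]; omega
          have hgl := hp2.getElem (i := b.length - 1) (by omega)
          have hnl : ((x :: t) ++ '\n' :: '\n' :: b)[b.length - 1]'hidx = '\n' := by
            rw [List.getElem_append_right (by simp at hc1 ⊢; omega)]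
            have hlt : t.length + 1 < b.length := by
              simp only [List.length_cons] at hc1; omega
            have hle3 : b.length ≤ t.length + 3 := by
              simp only [List.length_cons] at hle; omega
            rcases (by omega :
                b.length - 1 - (t.length + 1) = 0 ∨ b.length - 1 - (t.length + 1) = 1) with h | h <;>
              simp [h]
          have hbl : b[b.length - 1]'(by omega) = '\n' := hgl.trans hnl
          have hmem : b.getLast? = some '\n' := by
            rw [List.getLast?_eq_getElem?,
              List.getElem?_eq_getElem (show b.length - 1 < b.length by omega), hbl]
          have := hl '\n' hmem
          exact absurd this (by decide)
        cases f1 with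
        | zero => exfalso; simp only [List.length_cons] at h1; omega
        | succ f1' =>
        have hb2 : b.isPrefixOf (x :: (t ++ '\n' :: '\n' :: b)) = true := by
          rw [List.isPrefixOf_iff_prefix]; simpa using hp2
        rw [PySem.Chars.count.go.eq_def]
        simp only [List.cons_append]
        simp [hb2]
        rw [go_short b f1' (List.drop b.length (x :: (t ++ '\n' :: '\n' :: b))) (acc + 1) (by
          simp only [List.length_drop, List.length_cons, List.length_append,
            List.length_cons] at *
          omega)]
        rw [go_short b f2 (x :: t) acc (by
          simp only [List.length_cons] at hc1
          omega)]
  · -- no match starts here: both scans step one character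
    have hp1 : ¬ b <+: c := fun h => hp2 (h.trans (List.prefix_append _ _))
    cases f1 with
    | zero => exfalso; omega
    | succ f1' =>
    cases c with
    | nil =>
      -- skip the two '\n', then the appended copy of b matches itself
      rcases b with _ | ⟨b0, tb⟩
      · exact absurd rfl hne
      have hb0 : PySem.Chars.isspace b0 = false := hh b0 (by simp)
      have hb0n : b0 ≠ '\n' := by
        intro h; rw [h] at hb0; exact absurd hb0 (by decide)
      simp only [List.nil_append]
      rw [PySem.Chars.count.go.eq_def]
      have hnp : (b0 :: tb).isPrefixOf ('\n' :: '\n' :: b0 :: tb) = false := by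
        rw [Bool.eq_false_iff]
        intro h
        rw [List.isPrefixOf_iff_prefix] at h
        exact hb0n (by simpa using h.getElem (i := 0) (by simp))
      simp [hnp]
      cases f1' with
      | zero => exfalso; simp only [List.length_cons, List.length_nil] at h1; omega
      | succ f1'' =>
      rw [PySem.Chars.count.go.eq_def]
      have hnp2 : (b0 :: tb).isPrefixOf ('\n' :: b0 :: tb) = false := by
        rw [Bool.eq_false_iff]
        intro h
        rw [List.isPrefixOf_iff_prefix] at h
        exact hb0n (by simpa using h.getElem (i := 0) (by simp))
      simp [hnp2]
      cases f1'' with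
      | zero => exfalso; simp only [List.length_cons, List.length_nil] at h1; omega
      | succ f1''' =>
      rw [PySem.Chars.count.go.eq_def]
      simp [show (b0 :: tb).isPrefixOf (b0 :: tb) = true by rw [List.isPrefixOf_iff_prefix],
        List.drop_length, go_nil]
    | cons x t =>
      cases f2 with
      | zero => exfalso; simp only [List.length_cons] at h2; omega
      | succ f2' =>
      have hnp : b.isPrefixOf (x :: (t ++ '\n' :: '\n' :: b)) = false := by
        rw [Bool.eq_false_iff]
        intro h; rw [List.isPrefixOf_iff_prefix] at h; exact hp2 (by simpa using h)
      have hnp1 : b.isPrefixOf (x :: t) = false := by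
        rw [Bool.eq_false_iff]
        intro h; rw [List.isPrefixOf_iff_prefix] at h; exact hp1 h
      rw [PySem.Chars.count.go.eq_def]
      conv_rhs => rw [PySem.Chars.count.go.eq_def]
      simp only [List.cons_append]
      simp [hnp, hnp1]
      apply ih t.length (by simp at hcn; omega) _ _ _ _ rfl
      · simp at h1 ⊢; omega
      · simp at h2 ⊢; omega

theorem pv_count_append_block (b c : List Char) (hb : pvStripped b) :
    PySem.Chars.count (c ++ '\n' :: '\n' :: b) b = PySem.Chars.count c b + 1 := by
  have hne := hb.1
  have hemp : b.isEmpty = false := by cases b <;> simp_all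
  simp only [PySem.Chars.count, hemp, Bool.false_eq_true, if_neg, not_false_eq_true]
  exact go_key b hb (c.length) c 0 _ _ rfl (by simp; omega) le_rfl


theorem suffix_getLast? {α : Type} (z w : List α) (hs : z <:+ w) (hz : z ≠ []) :
    z.getLast? = w.getLast? := by
  obtain ⟨u, rfl⟩ := hs
  exact (List.getLast?_append_of_ne_nil u hz).symm

theorem pv_strip_stripped (x : List Char) (h : PySem.Chars.strip x ≠ []) :
    pvStripped (PySem.Chars.strip x) := by
  refine ⟨h, ?_, ?_⟩
  · -- head of strip x = getLast of dropWhile isspace (lstrip x).reverse chain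
    intro u hu
    simp only [PySem.Chars.strip, PySem.Chars.rstrip, PySem.Chars.lstrip] at hu h
    rw [List.head?_reverse] at hu
    have hz : List.dropWhile PySem.Chars.isspace (List.dropWhile PySem.Chars.isspace x).reverse ≠ [] := by
      intro hc; rw [hc] at h; exact h rfl
    rw [suffix_getLast? _ _ (List.dropWhile_suffix _) hz, List.getLast?_reverse] at hu
    have := List.head?_dropWhile_not PySem.Chars.isspace x
    rw [hu] at this
    exact this
  · intro u hu
    simp only [PySem.Chars.strip, PySem.Chars.rstrip, PySem.Chars.lstrip] at hu
    rw [List.getLast?_reverse] at hu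
    have := List.head?_dropWhile_not PySem.Chars.isspace
      (List.dropWhile PySem.Chars.isspace x).reverse
    rw [hu] at this
    exact this

-- the while-loop of A: `while content.count(b) < min_count: content += "\n\n" + b`
def pvLoopA (b : List Char) (hb : pvStripped b) (content : List Char) (min_count : Int) :
    List Char :=
  if (PySem.Chars.count content b : Int) < min_count then
    pvLoopA b hb (content ++ '\n' :: '\n' :: b) min_count
  else content
termination_by (min_count - (PySem.Chars.count content b : Int)).toNat
decreasing_by
  have h1 := pv_count_append_block b content hb
  omega

def ensure_brand_mentions_py (text : String) (brand : Option String) (min_count : Int) : String :=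
  -- content = str(text or "").strip(); b = str(brand or "").strip()  ('x or ""' is x itself for a
  -- string and "" for None, and str() is then the identity)
  let content := PySem.Chars.strip text.toList
  let b := PySem.Chars.strip (brand.getD "").toList
  if h : b = [] then String.ofList content
  else String.ofList (pvLoopA b (pv_strip_stripped (brand.getD "").toList h) content min_count)

-- ===== PORT B =====
def ensure_brand_mentions_py_alt (text : String) (brand : Option String) (min_count : Int) :
    String :=
  let content := PySem.Chars.strip text.toList
  let b := PySem.Chars.strip (brand.getD "").toList
  if b = [] then String.ofList content
  else
    let needed : Int := min_count - (PySem.Chars.count content b : Int)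
    -- content + ("\n\n" + b) * needed
    if needed > 0 then String.ofList (content ++ PySem.List.pyRepeat ('\n' :: '\n' :: b) needed)
    else String.ofList content

-- ===== PRECONDITION & SPEC =====
def Spec_ensure_brand_mentions_py (text : String) (brand : Option String) (min_count : Int) (out : String) : Prop := out = ensure_brand_mentions_py_alt text brand min_count
instance (text : String) (brand : Option String) (min_count : Int) (out : String) : Decidable (Spec_ensure_brand_mentions_py text brand min_count out) := by unfold Spec_ensure_brand_mentions_py; infer_instance

-- ===== CLAIM (what is proved, stated in full; the proofs are below) =====
def Claim_equal_ensure_brand_mentions_py : Prop := ∀ (text : String) (brand : Option String) (min_count : Int), Dom_ensure_brand_mentions_py text brand min_count → Spec_ensure_brand_mentions_py text brand min_count (ensure_brand_mentions_py text brand min_count)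

-- ===== LEMMAS AND PROOFS =====

theorem pyRepeat_pos {α : Type} (xs : List α) (k : Int) (hk : 1 ≤ k) :
    PySem.List.pyRepeat xs k = xs ++ PySem.List.pyRepeat xs (k - 1) := by
  simp only [PySem.List.pyRepeat]
  rw [show k.toNat = (k - 1).toNat + 1 by omega, List.replicate_succ, List.flatten_cons]

theorem pyRepeat_nonpos {α : Type} (xs : List α) (k : Int) (hk : k ≤ 0) :
    PySem.List.pyRepeat xs k = [] := by
  simp only [PySem.List.pyRepeat]
  rw [show k.toNat = 0 by omega, List.replicate_zero, List.flatten_nil]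

-- the loop appends exactly the deficit, in one block
theorem pvLoopA_eq (b : List Char) (hb : pvStripped b) (c : List Char) (m : Int) :
    pvLoopA b hb c m =
      c ++ PySem.List.pyRepeat ('\n' :: '\n' :: b) (m - (PySem.Chars.count c b : Int)) := by
  induction c using pvLoopA.induct b hb m with
  | case1 c hlt ih =>
    rw [pvLoopA, if_pos hlt, ih, pv_count_append_block b c hb]
    push_cast
    rw [show m - ((PySem.Chars.count c b : Int) + 1)
        = m - (PySem.Chars.count c b : Int) - 1 from by ring]
    rw [pyRepeat_pos ('\n' :: '\n' :: b) (m - (PySem.Chars.count c b : Int)) (by omega)]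
    simp
  | case2 c hge =>
    rw [pvLoopA, if_neg hge, pyRepeat_nonpos _ _ (by omega), List.append_nil]

-- ===== VERDICT (by name: the statement is the Claim_ definition above) =====
theorem ensure_brand_mentions_py_spec : Claim_equal_ensure_brand_mentions_py := by
  intro text brand min_count _
  unfold Spec_ensure_brand_mentions_py ensure_brand_mentions_py ensure_brand_mentions_py_alt
  by_cases hnil : PySem.Chars.strip (brand.getD "").toList = []
  · simp [hnil]
  · simp only [hnil, dif_neg, if_neg, not_false_eq_true]
    rw [pvLoopA_eq]
    by_cases hpos : min_count - (PySem.Chars.count (PySem.Chars.strip text.toList)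
        (PySem.Chars.strip (brand.getD "").toList) : Int) > 0
    · rw [if_pos hpos]
    · rw [if_neg hpos, pyRepeat_nonpos _ _ (by omega), List.append_nil]
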